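-- pv_equiv track=rewrite | github.com/Post169/Bernoulli-compress | bernoulli_lab.py | dict_words
-- ===== SOURCE A (Python) =====
-- def dict_words(data_length):
--     """dict_words finds max possible number of words in a dictionary
--     built by LZ78 algorithm from a bitstring of given length
--     """
--     max_length = 1
--     sum_lengths = 2
--     total_words = 2
--     while sum_lengths < data_length:
--         max_length += 1
--         sum_lengths = 2*(max_length*2**max_length - 2**max_length + 1)
--     extra_length = sum_lengths - data_length
--     total_words = 2*(2**max_length - 1)
--     extra_words = (extra_length + max_length - 1)//max_length
--     return total_words - extra_words
-- ===== SOURCE B (Python) =====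
-- def dict_words(data_length):
--     """Greedy simulation of LZ78 dictionary growth: consume complete word
--     levels while they fit, then count the partial last level by floor division."""
--     budget = data_length
--     total = 0
--     k = 1
--     while budget >= k * (2 ** k):
--         budget -= k * (2 ** k)
--         total += 2 ** k
--         k += 1
--     return total + budget // k
-- ===== Notes on version B (the rewrite author's own statement) =====
-- stated objective: simpler
-- what changed: Replaces A's closed-form sum_lengths formula with ceiling-based extra_words correction by a direct greedy simulation that consumes complete LZ78 word levels from the bit budget and counts the partial last level with one floor division.
import Mathlib
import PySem

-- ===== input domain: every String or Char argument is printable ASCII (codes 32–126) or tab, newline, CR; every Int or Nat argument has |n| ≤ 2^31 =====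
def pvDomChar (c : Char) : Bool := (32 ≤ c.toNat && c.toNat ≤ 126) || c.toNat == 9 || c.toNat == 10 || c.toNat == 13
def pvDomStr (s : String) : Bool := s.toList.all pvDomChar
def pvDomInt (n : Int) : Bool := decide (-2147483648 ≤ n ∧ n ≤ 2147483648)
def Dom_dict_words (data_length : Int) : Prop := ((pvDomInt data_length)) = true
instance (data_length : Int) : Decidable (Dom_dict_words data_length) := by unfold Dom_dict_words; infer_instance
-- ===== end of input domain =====

-- B replaces A's closed-form sum plus ceiling correction by a direct greedy
-- level-by-level simulation of LZ78 dictionary growth (objective: simpler).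

-- ===== PORT A =====
-- sum_lengths is a function of max_length throughout A's loop
-- (initially 2 = pvS 1, and reassigned to pvS max_length each iteration),
-- so the loop state is the counter alone; pvS m = 2*(m*2^m - 2^m + 1).
def pvS (m : Nat) : Int := 2*((m : Int)*2^m - 2^m + 1)

-- A's while loop; 'fuel' only totalizes it (each iteration needs pvS m < d and
-- pvS m ≥ 2*(m-1), so d.toNat + 1 ≥ the number of iterations; proved below).
def dictLoopA : Nat → Int → Nat → Nat
  | 0, _, m => m
  | fuel+1, d, m => if pvS m < d then dictLoopA fuel d (m+1) else m

def dict_words (data_length : Int) : Int :=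
  let max_length := dictLoopA (data_length.toNat + 1) data_length 1
  let sum_lengths := pvS max_length
  let extra_length := sum_lengths - data_length
  let total_words := 2*((2:Int)^max_length - 1)
  let extra_words := PySem.Int.floordiv (extra_length + max_length - 1) max_length
  total_words - extra_words

-- ===== PORT B =====
-- Source B's counter k starts at 1; here the Nat index k stands for level k+1.
-- 'fuel' only totalizes the while loop (each iteration consumes ≥ 2 from the
-- nonnegative budget, so d.toNat + 1 iterations always suffice; proved below);
-- the fuel-out branch is the loop's own exit expression.
def dictLoopB : Nat → Int → Int → Nat → Int
  | 0, budget, total, k => total + PySem.Int.floordiv budget ((k : Int)+1)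
  | fuel+1, budget, total, k =>
    if ((k : Int)+1) * 2^(k+1) ≤ budget then
      dictLoopB fuel (budget - ((k : Int)+1) * 2^(k+1)) (total + 2^(k+1)) (k+1)
    else
      total + PySem.Int.floordiv budget ((k : Int)+1)

def dict_words_alt (data_length : Int) : Int :=
  dictLoopB (data_length.toNat + 1) data_length 0 0

-- ===== PRECONDITION & SPEC =====
def Spec_dict_words (data_length : Int) (out : Int) : Prop := out = dict_words_alt data_length
instance (data_length : Int) (out : Int) : Decidable (Spec_dict_words data_length out) := by unfold Spec_dict_words; infer_instance

-- ===== CLAIM (what is proved, stated in full; the proofs are below) =====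
def Claim_equal_dict_words : Prop := ∀ (data_length : Int), Dom_dict_words data_length → Spec_dict_words data_length (dict_words data_length)

-- ===== LEMMAS AND PROOFS =====

-- pvS grows by (m+1)*2^(m+1) at each step.
theorem pvS_succ (m : Nat) : pvS (m+1) = pvS m + ((m : Int)+1)*2^(m+1) := by
  simp [pvS, pow_succ]; ring

-- A's final answer as a function of the loop result M.
def pvAns (d : Int) (M : Nat) : Int :=
  2*((2:Int)^M - 1) - PySem.Int.floordiv (pvS M - d + M - 1) (M : Int)

theorem dict_words_eq_pvAns (d : Int) :
    dict_words d = pvAns d (dictLoopA (d.toNat + 1) d 1) := rfl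

-- once the guard fails, A's loop returns its counter whatever the fuel
theorem loopA_stable (fuel : Nat) (d : Int) (m : Nat) (h : d ≤ pvS m) :
    dictLoopA fuel d m = m := by
  cases fuel with
  | zero => rfl
  | succ fuel => rw [dictLoopA, if_neg (by omega)]

-- once the guard fails, B's loop returns its exit expression whatever the fuel
theorem loopB_stable (fuel : Nat) (b t : Int) (k : Nat) (h : b < ((k : Int)+1) * 2^(k+1)) :
    dictLoopB fuel b t k = t + PySem.Int.floordiv b ((k : Int)+1) := by
  cases fuel with
  | zero => rfl
  | succ fuel => rw [dictLoopB, if_neg (by omega)]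

-- floor-division identity: for 0 < M, (M-1-a) / M = -(a / M) (Euclidean ediv)
theorem ediv_mirror (a M : Int) (hM : 0 < M) : (M - 1 - a) / M = -(a / M) := by
  have hq : M * (a / M) + a % M = a := Int.mul_ediv_add_emod a M
  have hr0 : 0 ≤ a % M := Int.emod_nonneg a (by omega)
  have hrM : a % M < M := Int.emod_lt_of_pos a hM
  have h1 : M - 1 - a = (M - 1 - a % M) + (-(a / M)) * M := by linear_combination hq
  rw [h1, Int.add_mul_ediv_right _ _ (by omega : M ≠ 0),
      Int.ediv_eq_zero_of_lt (by omega) (by omega)]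
  omega

-- when both loops stop, B's exit value and A's formula agree
-- (an unconditional arithmetic identity)
theorem stop_eq (k : Nat) (d : Int) :
    2*((2:Int)^k - 1) + PySem.Int.floordiv (d - pvS k) ((k : Int)+1) = pvAns d (k+1) := by
  have hM : (0:Int) < (k : Int) + 1 := by positivity
  unfold pvAns
  rw [PySem.Int.floordiv_eq_ediv_of_pos (by push_cast; omega : (0:Int) < ((k+1 : Nat) : Int)),
      PySem.Int.floordiv_eq_ediv_of_pos hM]
  have harg : pvS (k+1) - d + ((k+1 : Nat) : Int) - 1
      = (((k : Int)+1) - 1 - (d - pvS k)) + 2^(k+1) * (((k : Int)+1)) := by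
    rw [pvS_succ]; push_cast; ring
  rw [show ((k+1 : Nat) : Int) = (k : Int) + 1 from by push_cast; ring] at harg ⊢
  rw [harg, Int.add_mul_ediv_right _ _ (by omega : (k : Int) + 1 ≠ 0),
      ediv_mirror _ _ hM]
  have hp : (2:Int)^(k+1) = 2 * 2^k := by ring
  omega

theorem key : ∀ (fb fa : Nat) (k : Nat) (d : Int),
    d - pvS k ≤ 2 * fb → d - pvS k ≤ 2 * fa →
    dictLoopB fb (d - pvS k) (2*((2:Int)^k - 1)) k = pvAns d (dictLoopA fa d (k+1)) := by
  intro fb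
  induction fb with
  | zero =>
    intro fa k d hb _
    have hS := pvS_succ k
    have hpos : (0:Int) < ((k : Int)+1)*2^(k+1) := by positivity
    rw [loopB_stable _ _ _ _ (by omega), loopA_stable _ _ _ (by omega)]
    exact stop_eq k d
  | succ fb ih =>
    intro fa k d hb ha
    have hS := pvS_succ k
    have hpos : (0:Int) < ((k : Int)+1)*2^(k+1) := by positivity
    have h2 : (2:Int) ≤ ((k : Int)+1)*2^(k+1) := by
      have h21 : (2:Int)^(k+1) = 2 * 2^k := by ring
      have h22 : (0:Int) < 2^k := by positivity
      nlinarith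
    by_cases hg : pvS (k+1) ≤ d
    · -- B consumes the level k+1
      rw [dictLoopB, if_pos (by omega)]
      have hbdg : d - pvS k - ((k : Int)+1)*2^(k+1) = d - pvS (k+1) := by omega
      have ht : 2*((2:Int)^k - 1) + 2^(k+1) = 2*((2:Int)^(k+1) - 1) := by ring
      rw [hbdg, ht]
      by_cases hg' : pvS (k+1) < d
      · -- A's loop also continues; it has fuel left too
        obtain ⟨fa', rfl⟩ : ∃ fa', fa = fa' + 1 := ⟨fa - 1, by omega⟩
        rw [dictLoopA, if_pos hg']
        exact ih fa' (k+1) d (by omega) (by omega)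
      · -- d = pvS (k+1): A stops; B stops on the next round with budget 0
        have hd : d - pvS (k+1) = 0 := by omega
        have hpos2 : (0:Int) < ((↑(k+1) : Int)+1)*2^(k+1+1) := by positivity
        rw [loopA_stable _ _ _ (by omega), hd, loopB_stable _ _ _ _ (by omega)]
        rw [show PySem.Int.floordiv 0 ((↑(k+1) : Int) + 1) = 0 from by
              rw [PySem.Int.floordiv_eq_ediv_of_pos (by push_cast; omega)]; simp]
        unfold pvAns
        rw [show pvS (k+1) - d + ((k+1 : Nat) : Int) - 1 = (k : Int) from by push_cast; omega]
        rw [show PySem.Int.floordiv (k : Int) ((k+1 : Nat) : Int) = 0 from by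
              rw [PySem.Int.floordiv_eq_ediv_of_pos (by push_cast; omega)]
              exact Int.ediv_eq_zero_of_lt (by positivity) (by push_cast; omega)]
        omega
    · -- both loops stop
      rw [loopB_stable _ _ _ _ (by omega), loopA_stable _ _ _ (by omega)]
      exact stop_eq k d

-- ===== VERDICT (by name: the statement is the Claim_ definition above) =====
theorem dict_words_spec : Claim_equal_dict_words := by
  intro d _
  unfold Spec_dict_words
  have h00 : pvS 0 = 0 := by simp [pvS]
  have h0 : dict_words_alt d = dictLoopB (d.toNat + 1) (d - pvS 0) (2*((2:Int)^0 - 1)) 0 := by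
    rw [h00]; simp [dict_words_alt]
  rw [dict_words_eq_pvAns, h0,
      key (d.toNat + 1) (d.toNat + 1) 0 d (by omega) (by omega)]
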